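-- pv_equiv track=rewrite | github.com/ElaKaptsilava/advent_of_code_2024 | day4/sol1.py | get_main_diagonals
-- ===== SOURCE A (Python) =====
-- def get_main_diagonals(matrix):
--     rows, cols = len(matrix), len(matrix[0])
--     diagonals = {}
--
--     for row_i in range(rows):
--         for col_i in range(cols):
--             diagonal_identifier = row_i - col_i
--             if diagonal_identifier not in diagonals:
--                 diagonals[diagonal_identifier] = []
--             diagonals[diagonal_identifier].append(matrix[row_i][col_i])
--
--     return [diagonals[d] for d in sorted(diagonals.keys())]
-- ===== SOURCE B (Python) =====
-- def get_main_diagonals(matrix):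
--     rows, cols = len(matrix), len(matrix[0])
--     result = []
--     for d in range(-(cols - 1), rows):
--         lo = max(0, d)
--         hi = min(rows - 1, cols - 1 + d)
--         if lo <= hi:
--             result.append([matrix[r][r - d] for r in range(lo, hi + 1)])
--     return result
-- ===== Notes on version B (the rewrite author's own statement) =====
-- stated objective: alternative
-- what changed: B iterates per diagonal directly (one pass per diagonal index with computed row bounds), instead of binning every cell into a dict keyed by row-col and then sorting the keys.
import Mathlib
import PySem

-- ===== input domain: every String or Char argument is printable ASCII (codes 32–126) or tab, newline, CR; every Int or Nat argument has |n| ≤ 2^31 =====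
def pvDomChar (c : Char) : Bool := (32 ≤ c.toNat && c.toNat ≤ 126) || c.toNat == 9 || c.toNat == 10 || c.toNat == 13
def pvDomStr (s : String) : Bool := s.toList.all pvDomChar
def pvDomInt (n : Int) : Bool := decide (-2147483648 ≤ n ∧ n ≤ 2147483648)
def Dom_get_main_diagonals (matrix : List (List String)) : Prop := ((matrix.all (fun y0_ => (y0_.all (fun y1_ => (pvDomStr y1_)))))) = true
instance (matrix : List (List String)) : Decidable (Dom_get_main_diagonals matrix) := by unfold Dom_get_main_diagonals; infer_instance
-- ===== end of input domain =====

-- B builds each diagonal directly from computed row bounds instead of A's dict-binning-then-sort; an alternative decomposition, same asymptotic cost.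


-- ===== PORT A =====
def get_main_diagonals (matrix : List (List String)) : List (List String) :=
  let rows : Int := matrix.length
  let cols : Int := (PySem.List.pyGetD matrix 0 []).length   -- matrix[0]; IndexError on [] excluded by Pre_
  let diagonals : PySem.Dict Int (List String) :=
    (PySem.List.pyRange 0 rows 1).foldl (fun diagonals row_i =>
      (PySem.List.pyRange 0 cols 1).foldl (fun diagonals col_i =>
        let key := row_i - col_i
        let diagonals := if diagonals.contains key then diagonals else diagonals.insert key []
        -- diagonals[key].append(matrix[row_i][col_i]); indexing total under Pre_
        diagonals.modify key [] (fun l => l ++ [PySem.List.pyGetD (PySem.List.pyGetD matrix row_i []) col_i ""]))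
        diagonals)
      PySem.Dict.empty
  -- diagonals[d] for d in sorted(diagonals.keys()): d is always a key, so getD is exact
  (PySem.List.sorted diagonals.keys (fun k => k) false).map (fun d => diagonals.getD d [])

-- ===== PORT B =====
def get_main_diagonals_alt (matrix : List (List String)) : List (List String) :=
  let rows : Int := matrix.length
  let cols : Int := (PySem.List.pyGetD matrix 0 []).length   -- matrix[0]; IndexError on [] excluded by Pre_
  (PySem.List.pyRange (-(cols - 1)) rows 1).foldl (fun result d =>
    let lo := max 0 d
    let hi := min (rows - 1) (cols - 1 + d)
    if lo ≤ hi then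
      result ++ [(PySem.List.pyRange lo (hi + 1) 1).map
        (fun r => PySem.List.pyGetD (PySem.List.pyGetD matrix r []) (r - d) "")]
    else result) []

-- ===== PRECONDITION & SPEC =====
-- Pre_ excludes exactly the inputs where the Python A raises IndexError: the empty matrix
-- (matrix[0]) and matrices with a row shorter than len(matrix[0]) (matrix[row][col] out of range).
def Pre_get_main_diagonals (matrix : List (List String)) : Prop :=
  matrix ≠ [] ∧ ∀ row ∈ matrix, (PySem.List.pyGetD matrix 0 []).length ≤ row.length
instance (matrix : List (List String)) : Decidable (Pre_get_main_diagonals matrix) := by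
  unfold Pre_get_main_diagonals; infer_instance

def pvWitness_get_main_diagonals : List (List String) := [["a", "b"], ["c", "d"], ["e", "f"]]

def Spec_get_main_diagonals (matrix : List (List String)) (out : List (List String)) : Prop := out = get_main_diagonals_alt matrix
instance (matrix : List (List String)) (out : List (List String)) : Decidable (Spec_get_main_diagonals matrix out) := by unfold Spec_get_main_diagonals; infer_instance

-- ===== CLAIM (what is proved, stated in full; the proofs are below) =====
def Claim_equal_get_main_diagonals : Prop := ∀ (matrix : List (List String)), Dom_get_main_diagonals matrix → Pre_get_main_diagonals matrix → Spec_get_main_diagonals matrix (get_main_diagonals matrix)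

-- ===== LEMMAS AND PROOFS =====
def pvCell (matrix : List (List String)) (r c : Int) : String :=
  PySem.List.pyGetD (PySem.List.pyGetD matrix r []) c ""

def pvKV (matrix : List (List String)) (R C : Int) : List (Int × String) :=
  (PySem.List.pyRange 0 R).flatMap (fun r =>
    (PySem.List.pyRange 0 C).map (fun c => (r - c, pvCell matrix r c)))

-- A's conditional-insert-then-append step is the modify-with-default step
lemma pv_step (d : PySem.Dict Int (List String)) (k : Int) (s : String) :
    (if d.contains k then d else d.insert k []).modify k [] (· ++ [s]) = d.modify k [] (· ++ [s]) := by
  by_cases h : d.contains k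
  · simp [h]
  · simp only [h, Bool.false_eq_true, if_false, PySem.Dict.modify, PySem.Dict.getD,
      PySem.Dict.get?_insert_self, PySem.Dict.insert_insert_self, Option.getD_some]
    have hn : d.get? k = none := by
      rw [PySem.Dict.get?_eq_none_iff_contains]; simpa using h
    rw [hn]; rfl

-- A's double loop builds exactly the fold of pvKV
lemma pv_dictA (matrix : List (List String)) (R C : Int) :
    (PySem.List.pyRange 0 R).foldl (fun diagonals row_i =>
      (PySem.List.pyRange 0 C).foldl (fun diagonals col_i =>
        (if diagonals.contains (row_i - col_i) then diagonals
         else diagonals.insert (row_i - col_i) []).modify (row_i - col_i) []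
          (fun l => l ++ [PySem.List.pyGetD (PySem.List.pyGetD matrix row_i []) col_i ""]))
        diagonals)
      PySem.Dict.empty
    = (pvKV matrix R C).foldl (fun d q => d.modify q.1 [] (fun l => l ++ [q.2])) PySem.Dict.empty := by
  rw [pvKV, List.foldl_flatMap]
  refine PySem.List.foldl_congr_mem _ _ _ _ ?_
  intro acc r _
  rw [List.foldl_map]
  exact PySem.List.foldl_congr_mem _ _ _ _ (fun acc c _ => pv_step acc (r - c) (pvCell matrix r c))

-- the filtered cells of one diagonal
lemma pv_diag (matrix : List (List String)) (R C k : Int) (hC : 1 ≤ C) (hR : 1 ≤ R)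
    (hk1 : -(C - 1) ≤ k) (hk2 : k < R) :
    ((pvKV matrix R C).filter (fun q => q.1 == k)).map (·.2)
      = (PySem.List.pyRange (max 0 k) (min (R - 1) (C - 1 + k) + 1)).map
          (fun r => pvCell matrix r (r - k)) := by
  rw [pvKV, List.filter_flatMap, List.map_flatMap]
  have hmid : ∀ r : Int, max 0 k ≤ r → r < min (R - 1) (C - 1 + k) + 1 →
      (((PySem.List.pyRange 0 C).map (fun c => (r - c, pvCell matrix r c))).filter
        (fun q => q.1 == k)).map (·.2) = [pvCell matrix r (r - k)] := by
    intro r h1 h2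
    rw [List.filter_map]
    have hcongr : (PySem.List.pyRange 0 C).filter ((fun q => q.1 == k) ∘ (fun c => (r - c, pvCell matrix r c)))
        = (PySem.List.pyRange 0 C).filter (fun c => c == r - k) := by
      refine List.filter_congr ?_
      intro c _
      simp only [Function.comp]
      rw [Bool.eq_iff_iff]
      simp only [beq_iff_eq]
      omega
    rw [hcongr, List.filter_beq, List.Nodup.count (PySem.List.nodup_pyRange_one 0 C)]
    rw [if_pos (by rw [PySem.List.mem_pyRange_one]; omega)]
    simp
  have hsplit : PySem.List.pyRange 0 R
      = PySem.List.pyRange 0 (max 0 k) ++ PySem.List.pyRange (max 0 k) (min (R - 1) (C - 1 + k) + 1)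
        ++ PySem.List.pyRange (min (R - 1) (C - 1 + k) + 1) R := by
    rw [PySem.List.pyRange_one_append 0 (max 0 k) R (by omega) (by omega),
        PySem.List.pyRange_one_append (max 0 k) (min (R - 1) (C - 1 + k) + 1) R (by omega) (by omega),
        List.append_assoc]
  rw [hsplit, List.flatMap_append, List.flatMap_append]
  have hnil : ∀ r : Int, r ∈ PySem.List.pyRange 0 (max 0 k) ∨ r ∈ PySem.List.pyRange (min (R - 1) (C - 1 + k) + 1) R →
      (((PySem.List.pyRange 0 C).map (fun c => (r - c, pvCell matrix r c))).filter
        (fun q => q.1 == k)).map (·.2) = ([] : List String) := by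
    intro r hr
    rw [List.filter_map]
    have : (PySem.List.pyRange 0 C).filter ((fun q => q.1 == k) ∘ (fun c => (r - c, pvCell matrix r c))) = [] := by
      rw [List.filter_eq_nil_iff]
      intro c hc
      rw [PySem.List.mem_pyRange_one] at hc
      rcases hr with hr | hr <;> rw [PySem.List.mem_pyRange_one] at hr <;>
        · simp only [Function.comp, beq_iff_eq]; omega
    rw [this]; rfl
  have h1 : (PySem.List.pyRange 0 (max 0 k)).flatMap (fun r =>
      (((PySem.List.pyRange 0 C).map (fun c => (r - c, pvCell matrix r c))).filter
        (fun q => q.1 == k)).map (·.2)) = [] := by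
    rw [List.flatMap_eq_nil_iff]; intro r hr
    exact hnil r (Or.inl hr)
  have h3 : (PySem.List.pyRange (min (R - 1) (C - 1 + k) + 1) R).flatMap (fun r =>
      (((PySem.List.pyRange 0 C).map (fun c => (r - c, pvCell matrix r c))).filter
        (fun q => q.1 == k)).map (·.2)) = [] := by
    rw [List.flatMap_eq_nil_iff]; intro r hr
    exact hnil r (Or.inr hr)
  rw [h1, h3, List.nil_append, List.append_nil]
  rw [List.flatMap_congr (g := fun r => [pvCell matrix r (r - k)])
    (fun r hr => hmid r (PySem.List.mem_pyRange_one.mp hr).1 (PySem.List.mem_pyRange_one.mp hr).2)]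
  exact List.map_eq_flatMap.symm

-- the distinct diagonal keys, sorted, are exactly range(-(C-1), R)
lemma pv_sorted (matrix : List (List String)) (R C : Int) (hC : 1 ≤ C) (hR : 1 ≤ R) :
    PySem.List.sorted (PySem.Set.ofList ((pvKV matrix R C).map (·.1))) (fun k => k) false
      = PySem.List.pyRange (-(C - 1)) R := by
  refine PySem.List.sorted_eq_of_perm_of_pairwise_lt _ _ _ ?_ (PySem.List.pairwise_lt_pyRange_one _ _)
  rw [List.perm_ext_iff_of_nodup (PySem.List.nodup_pyRange_one _ _) (PySem.Set.nodup_ofList _)]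
  intro y
  rw [PySem.Set.mem_ofList, PySem.List.mem_pyRange_one]
  simp only [pvKV, List.mem_map, List.mem_flatMap, PySem.List.mem_pyRange_one]
  constructor
  · intro hy
    by_cases h0 : 0 ≤ y
    · exact ⟨(y, pvCell matrix y 0), ⟨y, by omega, 0, by omega, by simp⟩, rfl⟩
    · exact ⟨(y, pvCell matrix 0 (-y)), ⟨0, by omega, -y, by omega, by simp⟩, rfl⟩
  · rintro ⟨q, ⟨r, hr, c, hc, rfl⟩, rfl⟩
    omega

theorem pv_main (matrix : List (List String)) :
    get_main_diagonals matrix = get_main_diagonals_alt matrix := by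
  unfold get_main_diagonals get_main_diagonals_alt
  simp only []
  set R : Int := (matrix.length : Int) with hRdef
  set C : Int := ((PySem.List.pyGetD matrix 0 []).length : Int) with hCdef
  have hR0 : 0 ≤ R := by positivity
  have hC0 : 0 ≤ C := by positivity
  rw [show PySem.List.pyRange 0 R 1 = PySem.List.pyRange 0 R from rfl,
      show PySem.List.pyRange (-(C - 1)) R 1 = PySem.List.pyRange (-(C - 1)) R from rfl]
  rw [pv_dictA matrix R C]
  have hkeys : ((pvKV matrix R C).foldl
      (fun d q => d.modify q.1 [] (fun l => l ++ [q.2])) PySem.Dict.empty).keys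
      = PySem.Set.ofList ((pvKV matrix R C).map (·.1)) := by
    rw [PySem.Dict.keys_foldl_modify_key (pvKV matrix R C) (fun q => q.1) []
      (fun _ q => fun l => l ++ [q.2]) PySem.Dict.empty]
    rw [PySem.Dict.keys_empty, PySem.Set.update_nil_left]
  rw [hkeys]
  by_cases hC : 1 ≤ C
  · -- main case: C ≥ 1, hence matrix ≠ [] and R ≥ 1
    have hR : 1 ≤ R := by
      rcases matrix with _ | ⟨h, t⟩
      · exfalso; simp [PySem.List.pyGetD_zero] at hCdef; omega
      · simp [hRdef]
    rw [pv_sorted matrix R C hC hR]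
    have hB : (PySem.List.pyRange (-(C - 1)) R).foldl (fun result d =>
        if max 0 d ≤ min (R - 1) (C - 1 + d) then
          result ++ [(PySem.List.pyRange (max 0 d) (min (R - 1) (C - 1 + d) + 1) 1).map
            (fun r => PySem.List.pyGetD (PySem.List.pyGetD matrix r []) (r - d) "")]
        else result) []
        = (PySem.List.pyRange (-(C - 1)) R).map (fun d =>
            (PySem.List.pyRange (max 0 d) (min (R - 1) (C - 1 + d) + 1)).map
              (fun r => pvCell matrix r (r - d))) := by
      rw [PySem.List.foldl_congr_mem _ _ (fun result d =>
        result ++ [(PySem.List.pyRange (max 0 d) (min (R - 1) (C - 1 + d) + 1)).map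
          (fun r => pvCell matrix r (r - d))]) _ ?_]
      · exact PySem.List.foldl_append_singleton_eq_map _ _ []
      · intro acc d hd
        rw [PySem.List.mem_pyRange_one] at hd
        rw [if_pos (by omega)]
        rfl
    rw [hB]
    refine List.map_congr_left ?_
    intro k hk
    rw [PySem.List.mem_pyRange_one] at hk
    rw [PySem.Dict.getD_foldl_modify_append, PySem.Dict.getD_empty, List.nil_append]
    exact pv_diag matrix R C k hC hR hk.1 hk.2
  · -- degenerate case: first row empty (C = 0); both sides are []
    have hCz : C = 0 := by omega
    rw [hCz]
    have hkv : pvKV matrix R 0 = [] := by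
      simp [pvKV, PySem.List.pyRange_one_eq_nil (le_refl (0:Int))]
    rw [hkv]
    simp only [List.foldl_nil, List.map_nil]
    rw [show PySem.Set.ofList ([] : List Int) = [] from rfl]
    rw [show PySem.List.sorted ([] : List Int) (fun k => k) false = [] from rfl]
    rw [List.map_nil]
    rw [PySem.List.foldl_congr_mem _ _ (fun (result : List (List String)) d => result) _ ?_]
    · rw [PySem.List.foldl_ignore]
    · intro acc d hd
      rw [PySem.List.mem_pyRange_one] at hd
      rw [if_neg (by omega)]

-- ===== VERDICT (by name: the statement is the Claim_ definition above) =====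
theorem get_main_diagonals_spec : Claim_equal_get_main_diagonals := by
  intro matrix _ _
  unfold Spec_get_main_diagonals
  exact pv_main matrix
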